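-- pv_equiv track=rewrite | github.com/BubbleNeumann/coding-theory | main_1.py | vM
-- ===== SOURCE A (Python) =====
-- def vM(v, M):
--     vM = []
--     for i in range(0, len(M[0])):
--         c = 0
--         for j in range(0, len(M)):
--             c += M[j][i] * v[j]
--         vM.append(c % 2)
--     return vM
-- ===== SOURCE B (Python) =====
-- def vM(v, M):
--     res = [0] * len(M[0])
--     for j in range(len(M)):
--         vj = v[j]
--         row = M[j]
--         res = [res[i] + row[i] * vj for i in range(len(res))]
--     return [x % 2 for x in res]
-- ===== Notes on version B (the rewrite author's own statement) =====
-- stated objective: alternative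
-- what changed: B swaps the loop nesting: instead of computing each output column independently with an inner scan over rows, it keeps one running accumulator vector for the whole result, folds each matrix row into it, and reduces mod 2 once at the end.
-- outside the precondition, e.g. on vM([], [[], [1]]): A returns [], B raises IndexError
import Mathlib
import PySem

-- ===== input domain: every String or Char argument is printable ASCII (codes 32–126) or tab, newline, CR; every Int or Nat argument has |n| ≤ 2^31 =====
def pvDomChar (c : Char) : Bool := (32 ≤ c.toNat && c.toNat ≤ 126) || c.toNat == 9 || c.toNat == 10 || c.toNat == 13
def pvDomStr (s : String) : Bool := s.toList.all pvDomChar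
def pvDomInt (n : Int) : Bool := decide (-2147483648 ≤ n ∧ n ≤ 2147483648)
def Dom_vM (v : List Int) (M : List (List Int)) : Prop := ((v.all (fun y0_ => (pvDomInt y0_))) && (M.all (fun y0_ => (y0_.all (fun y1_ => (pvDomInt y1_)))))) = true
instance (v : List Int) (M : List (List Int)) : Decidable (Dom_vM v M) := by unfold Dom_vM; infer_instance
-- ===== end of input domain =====

-- B swaps the loop nesting: one running accumulator vector folded row by row, reduced mod 2 at the end; objective: alternative (same cost, different decomposition).


-- ===== PORT A =====
-- literal port of A: for each column i of M, scan all rows accumulating M[j][i]*v[j], append (c % 2)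
def vM (v : List Int) (M : List (List Int)) : List Int :=
  (PySem.List.pyRange 0 (PySem.List.len (PySem.List.pyGetD M 0 [])) 1).foldl
    (fun acc i =>
      acc ++ [PySem.Int.mod
        ((PySem.List.pyRange 0 (PySem.List.len M) 1).foldl
          (fun c j => c + PySem.List.pyGetD (PySem.List.pyGetD M j []) i 0 * PySem.List.pyGetD v j 0) 0) 2])
    []

-- ===== PORT B =====
-- literal port of B: accumulator vector res, fold each row j into it, take mod 2 at the end
def vM_alt (v : List Int) (M : List (List Int)) : List Int :=
  let res :=
    (PySem.List.pyRange 0 (PySem.List.len M) 1).foldl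
      (fun res j =>
        let vj := PySem.List.pyGetD v j 0
        let row := PySem.List.pyGetD M j []
        (PySem.List.pyRange 0 (PySem.List.len res) 1).map
          (fun i => PySem.List.pyGetD res i 0 + PySem.List.pyGetD row i 0 * vj))
      (List.replicate (PySem.List.len (PySem.List.pyGetD M 0 [])).toNat 0)
  res.map (fun x => PySem.Int.mod x 2)

-- ===== PRECONDITION & SPEC =====
-- Pre_ excludes exactly the inputs on which Python A raises IndexError: empty M (M[0]),
-- a row shorter than row 0 (M[j][i]), or v shorter than M (v[j]); when row 0 is empty A returns []
-- without touching v, while B still indexes v[j] and M[j][i] and raises -- such inputs stay excluded.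
def Pre_vM (v : List Int) (M : List (List Int)) : Prop :=
  M ≠ [] ∧ (∀ row ∈ M, (M.headD []).length ≤ row.length) ∧ M.length ≤ v.length
instance (v : List Int) (M : List (List Int)) : Decidable (Pre_vM v M) := by unfold Pre_vM; infer_instance
def pvWitness_vM : List Int × List (List Int) := ([1, 0], [[1, 1], [0, 1]])

def Spec_vM (v : List Int) (M : List (List Int)) (out : List Int) : Prop := out = vM_alt v M
instance (v : List Int) (M : List (List Int)) (out : List Int) : Decidable (Spec_vM v M out) := by unfold Spec_vM; infer_instance

-- ===== CLAIM (what is proved, stated in full; the proofs are below) =====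
def Claim_equal_vM : Prop := ∀ (v : List Int) (M : List (List Int)), Dom_vM v M → Pre_vM v M → Spec_vM v M (vM v M)

-- ===== LEMMAS AND PROOFS =====

-- the column-i dot product of v with the first m rows of M
def colSum (v : List Int) (M : List (List Int)) (i : Nat) (m : Nat) : Int :=
  (List.range m).foldl (fun c j => c + (M.getD j []).getD i 0 * v.getD j 0) 0

lemma getD_map_range' {α : Type} (f : Nat → α) (n i : Nat) (d : α) (hi : i < n) :
    ((List.range n).map f).getD i d = f i := by
  simp [List.getD, List.getElem?_map, List.getElem?_range, hi]

-- invariant of B's fold: after m rows, the accumulator holds the partial column sums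
lemma b_inv (v : List Int) (M : List (List Int)) (n m : Nat) :
    (List.range m).foldl
      (fun res j => (List.range res.length).map
        (fun i => res.getD i 0 + (M.getD j []).getD i 0 * v.getD j 0))
      (List.replicate n 0)
    = (List.range n).map (fun i => colSum v M i m) := by
  induction m with
  | zero => simp [colSum]
  | succ m ih =>
      rw [List.range_succ, List.foldl_append, ih]
      simp only [List.foldl_cons, List.foldl_nil, List.length_map, List.length_range]
      refine List.map_congr_left ?_
      intro i hi
      rw [getD_map_range' _ n i 0 (List.mem_range.mp hi)]
      simp [colSum, List.range_succ]

lemma vM_eq (v : List Int) (M : List (List Int)) :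
    vM v M = (List.range (M.getD 0 []).length).map
      (fun i => PySem.Int.mod (colSum v M i M.length) 2) := by
  simp only [vM, PySem.List.len_eq, PySem.List.pyGetD_zero, PySem.List.pyRange_zero_natCast,
    List.foldl_map, PySem.List.foldl_append_singleton_eq_map]
  refine List.map_congr_left ?_
  intro i _
  simp [colSum]

lemma vM_alt_eq (v : List Int) (M : List (List Int)) :
    vM_alt v M = (List.range (M.getD 0 []).length).map
      (fun i => PySem.Int.mod (colSum v M i M.length) 2) := by
  simp only [vM_alt, PySem.List.len_eq, PySem.List.pyGetD_zero, PySem.List.pyRange_zero_natCast,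
    List.foldl_map, List.map_map, Function.comp_def, PySem.List.pyGetD_natCast, Int.toNat_natCast]
  rw [b_inv, List.map_map]
  simp [Function.comp_def]

-- ===== VERDICT (by name: the statement is the Claim_ definition above) =====
theorem vM_spec : Claim_equal_vM := by
  intro v M _ _
  unfold Spec_vM
  rw [vM_eq, vM_alt_eq]
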